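-- pv_equiv track=rewrite | github.com/bme3412/AI_Projects_with_Python | google_NLP-api/transcript_analysis.py | extractive_summarization
-- ===== SOURCE A (Python) =====
-- def extractive_summarization(transcript, num_sentences=3):
--     sentences = transcript.split(". ")
--     sentence_scores = []
--
--     for sentence in sentences:
--         words = sentence.split()
--         score = len(words)
--         sentence_scores.append((sentence, score))
--
--     sentence_scores.sort(key=lambda x: x[1], reverse=True)
--     summary_sentences = [sentence for sentence, _ in sentence_scores[:num_sentences]]
--     summary = ". ".join(summary_sentences)
--
--     return summary
-- ===== SOURCE B (Python) =====
-- def extractive_summarization(transcript, num_sentences=3):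
--     buckets = {}
--     for sentence in transcript.split(". "):
--         buckets.setdefault(len(sentence.split()), []).append(sentence)
--     ranked = []
--     for score in sorted(buckets, reverse=True):
--         ranked.extend(buckets[score])
--     return ". ".join(ranked[:num_sentences])
-- ===== Notes on version B (the rewrite author's own statement) =====
-- stated objective: alternative
-- what changed: Replaces the stable reverse sort of the whole scored sentence list with a grouping sort: sentences are bucketed in a dict keyed by word count, the buckets are concatenated in descending key order, and the summary is the slice of that ranking.
import Mathlib
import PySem

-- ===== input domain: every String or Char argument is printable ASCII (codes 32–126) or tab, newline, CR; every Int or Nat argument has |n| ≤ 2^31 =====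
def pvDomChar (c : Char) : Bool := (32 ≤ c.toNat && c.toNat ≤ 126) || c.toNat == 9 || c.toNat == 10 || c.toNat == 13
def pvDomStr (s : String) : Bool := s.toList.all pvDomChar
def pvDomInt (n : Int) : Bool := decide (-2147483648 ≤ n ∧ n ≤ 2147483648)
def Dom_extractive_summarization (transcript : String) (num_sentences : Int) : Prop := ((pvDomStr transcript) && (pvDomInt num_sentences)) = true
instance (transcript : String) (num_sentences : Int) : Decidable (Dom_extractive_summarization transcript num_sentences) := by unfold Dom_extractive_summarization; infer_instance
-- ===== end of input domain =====

-- B groups sentences into buckets keyed by word count and concatenates the buckets in descending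
-- score order (grouping sort) instead of stable reverse-sorting the whole scored list (alternative).

-- ===== PORT A =====
def extractive_summarization (transcript : String) (num_sentences : Int) : String :=
  let sentences : List String := (PySem.Str.split? transcript ". ").getD []
  let sentence_scores : List (String × Int) :=
    sentences.foldl (fun acc s => acc ++ [(s, ((PySem.Str.split₀ s).length : Int))]) []
  let sorted := PySem.List.sorted sentence_scores (fun x => x.2) true
  let summary_sentences := (PySem.List.slice sorted none (some num_sentences)).map (fun x => x.1)
  PySem.Str.join ". " summary_sentences

-- ===== PORT B =====
def extractive_summarization_alt (transcript : String) (num_sentences : Int) : String :=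
  let sentences : List String := (PySem.Str.split? transcript ". ").getD []
  -- buckets.setdefault(len(sentence.split()), []).append(sentence)
  let buckets : PySem.Dict Int (List String) :=
    sentences.foldl
      (fun d s => d.modify ((PySem.Str.split₀ s).length : Int) [] (fun v => v ++ [s]))
      PySem.Dict.empty
  let ranked : List String :=
    (PySem.List.sorted buckets.keys (fun x => x) true).foldl
      (fun acc sc => acc ++ buckets.getD sc []) []
  PySem.Str.join ". " (PySem.List.slice ranked none (some num_sentences))

-- ===== PRECONDITION & SPEC =====
def Spec_extractive_summarization (transcript : String) (num_sentences : Int) (out : String) : Prop := out = extractive_summarization_alt transcript num_sentences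
instance (transcript : String) (num_sentences : Int) (out : String) : Decidable (Spec_extractive_summarization transcript num_sentences out) := by unfold Spec_extractive_summarization; infer_instance

-- ===== CLAIM (what is proved, stated in full; the proofs are below) =====
def Claim_equal_extractive_summarization : Prop := ∀ (transcript : String) (num_sentences : Int), Dom_extractive_summarization transcript num_sentences → Spec_extractive_summarization transcript num_sentences (extractive_summarization transcript num_sentences)

-- ===== LEMMAS AND PROOFS =====

-- insertBy passes over a block none of whose elements trigger `before`
theorem pv_insertBy_append {α : Type} (bef : α → α → Bool) (x : α) (u v : List α)
    (h : ∀ a ∈ u, bef x a = false) :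
    PySem.List.insertBy bef x (u ++ v) = u ++ PySem.List.insertBy bef x v := by
  induction u with
  | nil => rfl
  | cons a t ih =>
    have ha := h a (by simp)
    simp [PySem.List.insertBy, ha, ih (fun b hb => h b (by simp [hb]))]

-- an element strictly above everything in v is inserted at the front
theorem pv_insertBy_front (x : String × Int) (v : List (String × Int))
    (h : ∀ y ∈ v, y.2 < x.2) :
    PySem.List.insertBy (fun a b => decide (b.2 < a.2)) x v = x :: v := by
  cases v with
  | nil => rfl
  | cons a t => simp [PySem.List.insertBy, h a (by simp)]

-- inserting x into the bucket decomposition appends x to its own bucket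
theorem pv_insertBy_flatMap (ks : List Int) (g : Int → List (String × Int))
    (hks : ks.Pairwise (fun a b => b < a))
    (hg : ∀ k, ∀ y ∈ g k, y.2 = k)
    (x : String × Int) (hx : x.2 ∈ ks) :
    PySem.List.insertBy (fun a b => decide (b.2 < a.2)) x (ks.flatMap g)
      = ks.flatMap (fun k => if k = x.2 then g k ++ [x] else g k) := by
  induction ks with
  | nil => cases hx
  | cons k ks' ih =>
    have hlt : ∀ k' ∈ ks', k' < k := fun k' h' => (List.pairwise_cons.1 hks).1 k' h'
    by_cases hk : x.2 = k
    · have hskip : ∀ a ∈ g k, (fun a b => decide ((b : String × Int).2 < a.2)) x a = false := by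
        intro a ha
        simp [hg k a ha, hk]
      have hfront : ∀ y ∈ ks'.flatMap g, y.2 < x.2 := by
        intro y hy
        obtain ⟨k', hk', hyk'⟩ := List.mem_flatMap.1 hy
        rw [hg k' y hyk', hk]
        exact hlt k' hk'
      have hrest : ∀ k' ∈ ks', (if k' = x.2 then g k' ++ [x] else g k') = g k' := by
        intro k' h'
        have : k' ≠ x.2 := by
          have := hlt k' h'
          omega
        simp [this]
      simp only [List.flatMap_cons]
      rw [pv_insertBy_append _ _ _ _ hskip, pv_insertBy_front x _ hfront]
      simp only [if_pos hk.symm]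
      rw [List.flatMap_congr hrest]
      simp
    · have hx' : x.2 ∈ ks' := by
        rcases List.mem_cons.1 hx with h | h
        · exact absurd h hk
        · exact h
      have hxk : x.2 < k := hlt _ hx'
      have hskip : ∀ a ∈ g k, (fun a b => decide ((b : String × Int).2 < a.2)) x a = false := by
        intro a ha
        have := hg k a ha
        simp [this]
        omega
      simp only [List.flatMap_cons]
      rw [pv_insertBy_append _ _ _ _ hskip,
        ih ((List.pairwise_cons.1 hks).2) hx']
      simp [Ne.symm hk]

-- the stable reverse-sort fold keeps the bucket decomposition as an invariant
theorem pv_foldl_insertBy_flatMap (ks : List Int)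
    (hks : ks.Pairwise (fun a b => b < a)) :
    ∀ (rest p : List (String × Int)), (∀ x ∈ rest, x.2 ∈ ks) →
    rest.foldl (fun acc x => PySem.List.insertBy (fun a b => decide (b.2 < a.2)) x acc)
        (ks.flatMap (fun k => p.filter (fun y => y.2 == k)))
      = ks.flatMap (fun k => (p ++ rest).filter (fun y => y.2 == k)) := by
  intro rest
  induction rest with
  | nil => intro p _; simp
  | cons x rest' ih =>
    intro p hmem
    simp only [List.foldl_cons]
    rw [pv_insertBy_flatMap ks _ hks
      (fun k y hy => by simpa using (List.mem_filter.1 hy).2)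
      x (hmem x (by simp))]
    have hfun : ∀ k, (if k = x.2 then (p.filter (fun y => y.2 == k)) ++ [x]
          else p.filter (fun y => y.2 == k))
        = (p ++ [x]).filter (fun y => y.2 == k) := by
      intro k
      rw [List.filter_append]
      by_cases h : k = x.2 <;> simp [h, List.filter_cons]
      · omega
    have := ih (p ++ [x]) (fun y hy => hmem y (by simp [hy]))
    simp only [funext hfun]
    rw [this]
    simp

-- A's stable reverse sort is the concatenation of score buckets in descending score order
theorem pv_sorted_eq_flatMap (l : List (String × Int)) (ks : List Int)
    (hks : ks.Pairwise (fun a b => b < a)) (hmem : ∀ x ∈ l, x.2 ∈ ks) :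
    PySem.List.sorted l (fun x => x.2) true
      = ks.flatMap (fun k => l.filter (fun y => y.2 == k)) := by
  rw [PySem.List.sorted_rev_eq_foldl_insertBy]
  have h0 : (ks.flatMap (fun k => ([] : List (String × Int)).filter (fun y => y.2 == k))) = [] := by
    simp
  have := pv_foldl_insertBy_flatMap ks hks l [] hmem
  rw [h0] at this
  simpa using this

-- xs[:b] on a mapped list = map of xs[:b]
theorem pv_slice_map {α β : Type} (f : α → β) (xs : List α) (b : Int) :
    PySem.List.slice (xs.map f) none (some b) = (PySem.List.slice xs none (some b)).map f := by
  simp [PySem.List.slice, List.map_take]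

-- B's grouped-and-concatenated ranking equals the first components of A's stable reverse sort
theorem pv_ranked_eq (sentences : List String) (sc : String → Int) :
    ((PySem.List.sorted
        (sentences.foldl (fun d s => d.modify (sc s) [] (fun v => v ++ [s]))
          PySem.Dict.empty).keys (fun x => x) true).foldl
      (fun acc k => acc ++
        (sentences.foldl (fun d s => d.modify (sc s) [] (fun v => v ++ [s]))
          PySem.Dict.empty).getD k []) [])
    = (PySem.List.sorted (sentences.map (fun s => (s, sc s))) (fun x => x.2) true).map
        (fun x => x.1) := by
  set buckets := sentences.foldl (fun d s => d.modify (sc s) [] (fun v => v ++ [s]))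
    PySem.Dict.empty with hb
  have hkeys : buckets.keys = PySem.Set.ofList (sentences.map sc) := by
    rw [hb, PySem.Dict.keys_foldl_modify_key sentences sc [] (fun _ s v => v ++ [s])]
    simp [PySem.Dict.keys_empty, PySem.Set.update, PySem.Set.ofList_eq_foldl]
  set ks := PySem.List.sorted buckets.keys (fun x => x) true with hK
  have hnodupK : ks.Nodup := by
    refine (PySem.List.sorted_perm buckets.keys (fun x => x) true).nodup_iff.2 ?_
    rw [hkeys]
    exact PySem.Set.nodup_ofList _
  have hpairK : ks.Pairwise (fun a b => b < a) := by
    have h1 := PySem.List.sorted_pairwise_rev buckets.keys (fun x => x)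
    exact (h1.and hnodupK).imp (fun h => lt_of_le_of_ne h.1 (Ne.symm h.2))
  have hmemK : ∀ k, k ∈ ks ↔ k ∈ sentences.map sc := by
    intro k
    rw [hK, PySem.List.mem_sorted, hkeys, PySem.Set.mem_ofList]
  have hgetD : ∀ k, buckets.getD k [] = ((sentences.map (fun s => (sc s, s))).filter
      (fun p => p.1 == k)).map (fun p => p.2) := by
    intro k
    rw [hb, ← List.foldl_map (f := fun s => (sc s, s))
      (g := fun (d : PySem.Dict Int (List String)) p => d.modify p.1 [] (fun v => v ++ [p.2])),
      PySem.Dict.getD_foldl_modify_append]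
    simp
  have hranked : ks.foldl (fun acc k => acc ++ buckets.getD k []) []
      = ks.flatMap (fun k => buckets.getD k []) := by
    rw [PySem.List.foldl_append_eq_flatMap]
    simp
  have hsorted : PySem.List.sorted (sentences.map (fun s => (s, sc s))) (fun x => x.2) true
      = ks.flatMap (fun k => (sentences.map (fun s => (s, sc s))).filter (fun y => y.2 == k)) := by
    refine pv_sorted_eq_flatMap _ ks hpairK ?_
    intro x hx
    obtain ⟨s, hs, rfl⟩ := List.mem_map.1 hx
    exact (hmemK _).2 (List.mem_map.2 ⟨s, hs, rfl⟩)
  rw [hranked, hsorted, List.map_flatMap]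
  refine List.flatMap_congr ?_
  intro k _
  rw [hgetD k, List.filter_map, List.filter_map, List.map_map, List.map_map]
  rfl

-- ===== VERDICT (by name: the statement is the Claim_ definition above) =====
theorem extractive_summarization_spec : Claim_equal_extractive_summarization := by
  intro transcript num_sentences _
  unfold Spec_extractive_summarization
  simp only [extractive_summarization, extractive_summarization_alt]
  rw [PySem.List.foldl_append_singleton_eq_map]
  simp only [List.nil_append]
  rw [← pv_slice_map, ← pv_ranked_eq ((PySem.Str.split? transcript ". ").getD [])
    (fun s => ((PySem.Str.split₀ s).length : Int))]
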